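-- pv_equiv track=rewrite | github.com/ishangote/Coding-Interviews-Python | Leetcode/227 Basic Calculator II/basic_calculator_ii.py | basic_calculator_ii
-- ===== SOURCE A (Python) =====
-- def basic_calculator_ii(expr):
--     # Remove whitespaces
--     expr = "".join(expr.split())
--
--     last_sign, cur_num = "+", 0
--     stack = []
--
--     for idx, char in enumerate(expr):
--         if char.isdigit():
--             cur_num = cur_num * 10 + int(char)
--
--         if not char.isdigit() or idx == len(expr) - 1:
--             if last_sign == "+":
--                 stack.append(cur_num)
--
--             elif last_sign == "-":
--                 stack.append(-1 * cur_num)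
--
--             elif last_sign == "*":
--                 stack.append(stack.pop() * cur_num)
--
--             elif last_sign == "/":
--                 # Note: -3 // 2 = -2 and int(-3 / 2) = -1
--                 stack.append(int(stack.pop() / cur_num))
--
--             last_sign = char
--             cur_num = 0
--
--     return sum(stack)
-- ===== SOURCE B (Python) =====
-- def basic_calculator_ii(expr):
--     # Two running scalars (result, prev) instead of a stack.
--     s = "".join(expr.split())
--     n = len(s)
--     result, prev = 0, 0
--     last_sign, cur = "+", 0
--     for i, ch in enumerate(s):
--         if ch.isdigit():
--             cur = cur * 10 + int(ch)
--         if not ch.isdigit() or i == n - 1: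
--             if last_sign == "+":
--                 result += cur
--                 prev = cur
--             elif last_sign == "-":
--                 result -= cur
--                 prev = -cur
--             elif last_sign == "*":
--                 result -= prev
--                 prev *= cur
--                 result += prev
--             elif last_sign == "/":
--                 result -= prev
--                 prev = int(prev / cur)
--                 result += prev
--             last_sign = ch
--             cur = 0
--     return result
-- ===== Notes on version B (the rewrite author's own statement) =====
-- stated objective: alternative
-- what changed: Replaces A's stack of signed terms (appended/popped per operator, summed at the end) with two running scalars: a running total and the value last contributed, which is retracted and re-added on '*' and '/'.
import Mathlib
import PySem

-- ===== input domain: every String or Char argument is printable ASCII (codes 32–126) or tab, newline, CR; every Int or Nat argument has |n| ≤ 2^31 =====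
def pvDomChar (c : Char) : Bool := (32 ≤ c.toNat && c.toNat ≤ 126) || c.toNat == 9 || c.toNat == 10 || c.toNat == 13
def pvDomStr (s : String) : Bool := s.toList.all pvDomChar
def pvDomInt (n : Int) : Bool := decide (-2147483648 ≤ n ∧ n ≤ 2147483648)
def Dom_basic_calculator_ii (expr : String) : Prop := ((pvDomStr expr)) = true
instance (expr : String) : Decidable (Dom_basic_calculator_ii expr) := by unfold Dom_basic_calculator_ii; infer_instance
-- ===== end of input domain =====

-- B keeps two running scalars (result, prev) instead of A's stack; return values agree wherever A returns
-- (Pre_ excludes exactly the division-by-zero inputs, on which both Pythons raise ZeroDivisionError).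

-- Shared primitive: Python's int(x / y) (truncation of the correctly rounded double quotient).
-- PySem.Int.truncdiv is only exact for |x|,|y| < 2^53, so the rounding is done here exactly:
-- round x/y to 53 significand bits (nearest, ties to even), then truncate toward zero.
-- Exact whenever Python's x / y is finite (no OverflowError) and y ≠ 0; returns 0 on y = 0 (Python raises there; excluded by Pre_).
def pvRoundNearestEven (num den : Nat) : Nat :=
  let q := num / den
  let r := num % den
  if den < 2 * r then q + 1
  else if 2 * r < den then q
  else if q % 2 = 0 then q else q + 1

def pvTruncFloatDiv (x y : Int) : Int :=
  if y = 0 then 0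
  else if x = 0 then 0
  else
    let A := x.natAbs
    let B := y.natAbs
    let s : Int := if (x < 0) = (y < 0) then 1 else -1
    let e0 : Int := (Nat.log2 A : Int) - (Nat.log2 B : Int)
    let e : Int :=
      if (if 0 ≤ e0 then B * 2 ^ e0.toNat ≤ A else B ≤ A * 2 ^ (-e0).toNat) then e0 else e0 - 1
    let k : Int := 52 - e
    let n : Nat :=
      if 0 ≤ k then pvRoundNearestEven (A * 2 ^ k.toNat) B
      else pvRoundNearestEven A (B * 2 ^ (-k).toNat)
    let m : Nat := if k ≤ 0 then n * 2 ^ (-k).toNat else n / 2 ^ k.toNat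
    s * (m : Int)

-- ===== PORT A =====
-- int(char) on a guaranteed single digit char is its code minus 48 (exact on the isdigit-guarded branch).
def pvDigitVal (c : Char) : Int := (c.toNat : Int) - 48

-- the stack after one sign application; the [] cases of '*'/'/' are unreachable
-- (the first processed sign is '+', which pushes; the stack never shrinks afterwards)
def pvApplyA (sign : Char) (cur : Int) (stack : List Int) : List Int :=
  if sign = '+' then cur :: stack
  else if sign = '-' then (-1 * cur) :: stack
  else if sign = '*' then
    match stack with
    | t :: r => (t * cur) :: r
    | [] => []
  else if sign = '/' then
    match stack with
    | t :: r => pvTruncFloatDiv t cur :: r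
    | [] => []
  else stack

-- the for-loop over enumerate(expr): 'idx == len(expr) - 1' is 'rest = []'
def pvLoopA (sign : Char) (cur : Int) (stack : List Int) : List Char → List Int
  | [] => stack
  | c :: rest =>
    let cur' := if PySem.Chars.isdigit c then cur * 10 + pvDigitVal c else cur
    if ¬ (PySem.Chars.isdigit c = true) ∨ rest = [] then
      pvLoopA c 0 (pvApplyA sign cur' stack) rest
    else
      pvLoopA sign cur' stack rest

def basic_calculator_ii (expr : String) : Int :=
  let s := PySem.Chars.join [] (PySem.Chars.split₀ expr.toList)  -- "".join(expr.split())
  (pvLoopA '+' 0 [] s).sum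

-- ===== PORT B =====
-- one sign application on the scalar pair (result, prev)
def pvApplyB (sign : Char) (cur : Int) (result prev : Int) : Int × Int :=
  if sign = '+' then (result + cur, cur)
  else if sign = '-' then (result - cur, -cur)
  else if sign = '*' then
    let p := prev * cur
    (result - prev + p, p)
  else if sign = '/' then
    let p := pvTruncFloatDiv prev cur
    (result - prev + p, p)
  else (result, prev)

def pvLoopB (sign : Char) (cur : Int) (result prev : Int) : List Char → Int
  | [] => result
  | c :: rest =>
    let cur' := if PySem.Chars.isdigit c then cur * 10 + pvDigitVal c else cur
    if ¬ (PySem.Chars.isdigit c = true) ∨ rest = [] then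
      let rp := pvApplyB sign cur' result prev
      pvLoopB c 0 rp.1 rp.2 rest
    else
      pvLoopB sign cur' result prev rest

def basic_calculator_ii_alt (expr : String) : Int :=
  let s := PySem.Chars.join [] (PySem.Chars.split₀ expr.toList)  -- "".join(expr.split())
  pvLoopB '+' 0 0 0 s

-- ===== PRECONDITION & SPEC =====
-- the maximal digit prefix of the list represents 0 (it is empty or all '0')
def pvZeroPrefix : List Char → Bool
  | [] => true
  | c :: t => if PySem.Chars.isdigit c then decide (c = '0') && pvZeroPrefix t else true

-- no '/' (other than a trailing one) is followed by a digit run of value 0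
def pvNoDivZero : List Char → Bool
  | [] => true
  | c :: rest => !(decide (c = '/') && !rest.isEmpty && pvZeroPrefix rest) && pvNoDivZero rest

-- Pre_ excludes exactly the inputs on which A raises ZeroDivisionError: those whose whitespace-stripped
-- form has a non-trailing '/' whose following digit run (possibly empty) has value 0. B raises there too.
def Pre_basic_calculator_ii (expr : String) : Prop :=
  pvNoDivZero (PySem.Chars.join [] (PySem.Chars.split₀ expr.toList)) = true
instance (expr : String) : Decidable (Pre_basic_calculator_ii expr) := by
  unfold Pre_basic_calculator_ii; infer_instance

def pvWitness_basic_calculator_ii : String := "3+5 / 2*4-1"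

def Spec_basic_calculator_ii (expr : String) (out : Int) : Prop := out = basic_calculator_ii_alt expr
instance (expr : String) (out : Int) : Decidable (Spec_basic_calculator_ii expr out) := by
  unfold Spec_basic_calculator_ii; infer_instance

-- ===== CLAIM (what is proved, stated in full; the proofs are below) =====
def Claim_equal_basic_calculator_ii : Prop := ∀ (expr : String), Dom_basic_calculator_ii expr → Pre_basic_calculator_ii expr → Spec_basic_calculator_ii expr (basic_calculator_ii expr)

-- ===== LEMMAS AND PROOFS =====
theorem pvTruncFloatDiv_zero_left (y : Int) : pvTruncFloatDiv 0 y = 0 := by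
  unfold pvTruncFloatDiv
  split_ifs <;> simp_all

-- one sign application preserves the coupling: result tracks the stack sum, prev tracks the top
theorem pvApplyB_eq (sign : Char) (cur : Int) (stack : List Int) :
    pvApplyB sign cur stack.sum (stack.headD 0)
      = ((pvApplyA sign cur stack).sum, (pvApplyA sign cur stack).headD 0) := by
  unfold pvApplyA pvApplyB
  split_ifs <;> cases stack <;> simp [pvTruncFloatDiv_zero_left] <;> ring

-- loop invariant: B's scalars reproduce the sum and top of A's stack
theorem pvLoop_eq (l : List Char) : ∀ (sign : Char) (cur : Int) (stack : List Int),
    pvLoopB sign cur stack.sum (stack.headD 0) l = (pvLoopA sign cur stack l).sum := by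
  induction l with
  | nil => intro sign cur stack; simp [pvLoopA, pvLoopB]
  | cons c rest ih =>
    intro sign cur stack
    simp only [pvLoopA, pvLoopB]
    split
    · rw [pvApplyB_eq]
      exact ih c 0 (pvApplyA sign _ stack)
    · exact ih sign _ stack

-- ===== VERDICT (by name: the statement is the Claim_ definition above) =====
theorem basic_calculator_ii_spec : Claim_equal_basic_calculator_ii := by
  intro expr _ _
  unfold Spec_basic_calculator_ii basic_calculator_ii basic_calculator_ii_alt
  exact (pvLoop_eq _ '+' 0 []).symm
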